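-- pv_equiv track=rewrite | github.com/pypi-data/pypi-mirror-203 | packages/yadr/yadr-0.1.2.tar.gz/yadr-0.1.2/yadr/operator.py | pool_keep_high
-- ===== SOURCE A (Python) =====
-- from collections.abc import Callable, Sequence
--
-- def pool_keep_high(pool: Sequence[int], keep: int) -> tuple[int, ...]:
--     """Keep a number of the highest dice."""
--     pool = list(pool)
--     remove = len(pool) - keep
--     for _ in range(remove):
--         low_value = max(pool)
--         low_index = 0
--         for i, n in enumerate(pool):
--             if n < low_value:
--                 low_value = n
--                 low_index = i
--         pool.pop(low_index)
--     return tuple(pool)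
-- ===== SOURCE B (Python) =====
-- def pool_keep_high(pool, keep):
--     """Keep a number of the highest dice."""
--     pool = list(pool)
--     remove = len(pool) - keep
--     if remove <= 0:
--         return tuple(pool)
--     threshold = sorted(pool)[remove - 1]
--     budget = remove - sum(1 for n in pool if n < threshold)
--     result = []
--     for n in pool:
--         if n < threshold:
--             continue
--         if n == threshold and budget > 0:
--             budget -= 1
--             continue
--         result.append(n)
--     return tuple(result)
-- ===== Notes on version B (the rewrite author's own statement) =====
-- stated objective: faster
-- what changed: Replaces the repeated min-scan-and-pop loop by one sort to find the threshold value (the remove-th smallest), then a single pass that drops everything below it and the first 'budget' copies equal to it.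
import Mathlib
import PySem

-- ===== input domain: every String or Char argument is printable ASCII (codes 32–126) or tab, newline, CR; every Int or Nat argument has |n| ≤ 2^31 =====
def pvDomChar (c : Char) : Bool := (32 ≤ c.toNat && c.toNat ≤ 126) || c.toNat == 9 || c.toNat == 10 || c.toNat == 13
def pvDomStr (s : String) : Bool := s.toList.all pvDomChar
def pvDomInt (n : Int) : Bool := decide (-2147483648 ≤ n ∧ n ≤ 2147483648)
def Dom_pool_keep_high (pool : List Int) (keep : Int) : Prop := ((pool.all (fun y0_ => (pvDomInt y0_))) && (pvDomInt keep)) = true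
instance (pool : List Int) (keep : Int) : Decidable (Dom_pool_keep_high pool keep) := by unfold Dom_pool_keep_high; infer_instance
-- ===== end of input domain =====

-- B replaces A's repeated min-scan-and-pop loop by one sort (threshold = remove-th smallest) plus a
-- single counting pass; objective: faster. Return value only (A pops from its local copy of pool).

-- ===== PORT A =====
-- one iteration of A's outer loop; `none` models the ValueError raised by max([]) (outside Pre_)
def pkhStepA (st : Option (List Int)) (_i : Int) : Option (List Int) :=
  match st with
  | none => none
  | some p =>
    match PySem.List.max? p (fun y => y) with
    | none => none  -- max([]) raises ValueError
    | some m =>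
      let s := (PySem.List.enumerate p 0).foldl
        (fun (acc : Int × Int) (q : Int × Int) => if q.2 < acc.1 then (q.2, q.1) else acc) (m, 0)
      match PySem.List.pop? p s.2 with
      | none => none
      | some r => some r.2

def pool_keep_high (pool : List Int) (keep : Int) : List Int :=
  let remove := PySem.List.len pool - keep
  match (PySem.List.pyRange 0 remove 1).foldl pkhStepA (some pool) with
  | some p => p
  | none => []  -- ValueError path (keep < 0), outside Pre_

-- ===== PORT B =====
def pool_keep_high_alt (pool : List Int) (keep : Int) : List Int :=
  let remove := PySem.List.len pool - keep
  if remove ≤ 0 then pool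
  else
    match PySem.List.pyGet? (PySem.List.sorted pool (fun y => y) false) (remove - 1) with
    | none => []  -- IndexError path (keep < 0), outside Pre_
    | some t =>
      let budget := remove - ((pool.map (fun n => if n < t then (1 : Int) else 0)).sum)
      let r := pool.foldl
        (fun (acc : List Int × Int) n =>
          if n < t then acc
          else if n = t ∧ 0 < acc.2 then (acc.1, acc.2 - 1)
          else (acc.1 ++ [n], acc.2)) ([], budget)
      r.1

-- ===== PRECONDITION & SPEC =====
-- Pre_ excludes keep < 0, exactly the inputs on which A raises ValueError (max of an emptied pool).
def Pre_pool_keep_high (pool : List Int) (keep : Int) : Prop := 0 ≤ keep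
instance (pool : List Int) (keep : Int) : Decidable (Pre_pool_keep_high pool keep) := by unfold Pre_pool_keep_high; infer_instance
def pvWitness_pool_keep_high : List Int × Int := ([3, 1, 4, 1, 5], 3)
def Spec_pool_keep_high (pool : List Int) (keep : Int) (out : List Int) : Prop := out = pool_keep_high_alt pool keep
instance (pool : List Int) (keep : Int) (out : List Int) : Decidable (Spec_pool_keep_high pool keep out) := by unfold Spec_pool_keep_high; infer_instance

-- ===== CLAIM (what is proved, stated in full; the proofs are below) =====
def Claim_equal_pool_keep_high : Prop := ∀ (pool : List Int) (keep : Int), Dom_pool_keep_high pool keep → Pre_pool_keep_high pool keep → Spec_pool_keep_high pool keep (pool_keep_high pool keep)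

-- ===== LEMMAS AND PROOFS =====

-- abstract "erase the first occurrence of the minimum" step and its iteration
def pkhDrop1 : List Int → List Int
  | [] => []
  | x :: t => (x :: t).erase (t.foldl min x)

def pkhDropMins : Nat → List Int → List Int
  | 0, p => p
  | k + 1, p => pkhDropMins k (pkhDrop1 p)

lemma foldl_min_le_init (p : List Int) (a : Int) : p.foldl min a ≤ a := by
  induction p generalizing a with
  | nil => simp
  | cons x t ih => exact le_trans (ih (min a x)) (min_le_left _ _)

lemma foldl_min_le_mem (p : List Int) (a : Int) : ∀ x ∈ p, p.foldl min a ≤ x := by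
  induction p generalizing a with
  | nil => simp
  | cons y t ih =>
    intro x hx
    rcases List.mem_cons.1 hx with h | h
    · subst h; exact le_trans (foldl_min_le_init t (min a x)) (min_le_right _ _)
    · exact ih (min a y) x h

lemma foldl_min_eq_init (p : List Int) (a : Int) (h : ∀ x ∈ p, a ≤ x) : p.foldl min a = a := by
  induction p generalizing a with
  | nil => rfl
  | cons x t ih =>
    simp only [List.foldl_cons]
    rw [min_eq_left (h x (List.mem_cons_self))]
    exact ih a (fun y hy => h y (List.mem_cons_of_mem _ hy))

lemma foldl_min_mem_or (p : List Int) (a : Int) : p.foldl min a = a ∨ p.foldl min a ∈ p := by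
  induction p generalizing a with
  | nil => left; rfl
  | cons x t ih =>
    simp only [List.foldl_cons]
    rcases ih (min a x) with h | h
    · rcases le_total a x with hax | hxa
      · left; rw [h, min_eq_left hax]
      · right; rw [h, min_eq_right hxa]; exact List.mem_cons_self
    · right; exact List.mem_cons_of_mem _ h

lemma pkh_scan_spec (q : List Int) (s lv li : Int) :
    (PySem.List.enumerate q s).foldl
      (fun (acc : Int × Int) (qq : Int × Int) => if qq.2 < acc.1 then (qq.2, qq.1) else acc) (lv, li)
      = if ∃ x ∈ q, x < lv then (q.foldl min lv, s + (q.idxOf (q.foldl min lv) : Int)) else (lv, li) := by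
  induction q generalizing s lv li with
  | nil => simp [PySem.List.enumerate_nil]
  | cons x t ih =>
    rw [PySem.List.enumerate_cons]
    simp only [List.foldl_cons]
    by_cases hx : x < lv
    · simp only [if_pos hx]
      rw [ih (s + 1) x s, min_eq_right (le_of_lt hx)]
      by_cases ht : ∃ y ∈ t, y < x
      · rw [if_pos ht, if_pos ⟨x, List.mem_cons_self, hx⟩]
        obtain ⟨y, hy, hyx⟩ := ht
        have hlt : t.foldl min x < x := lt_of_le_of_lt (foldl_min_le_mem t x y hy) hyx
        have hne : t.foldl min x ≠ x := ne_of_lt hlt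
        rw [List.idxOf_cons_ne t (Ne.symm hne)]
        simp only [Prod.mk.injEq, Nat.succ_eq_add_one]
        exact ⟨trivial, by push_cast; ring⟩
      · rw [if_neg ht, if_pos ⟨x, List.mem_cons_self, hx⟩]
        have hmin : t.foldl min x = x :=
          foldl_min_eq_init t x (fun y hy => le_of_not_gt (fun hc => ht ⟨y, hy, hc⟩))
        rw [hmin, List.idxOf_cons_self]
        simp
    · simp only [if_neg hx]
      have hlvx : lv ≤ x := le_of_not_gt hx
      rw [ih (s + 1) lv li, min_eq_left hlvx]
      by_cases ht : ∃ y ∈ t, y < lv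
      · rw [if_pos ht, if_pos (by obtain ⟨y, hy, h⟩ := ht; exact ⟨y, List.mem_cons_of_mem _ hy, h⟩)]
        obtain ⟨y, hy, hyl⟩ := ht
        have hlt : t.foldl min lv < lv := lt_of_le_of_lt (foldl_min_le_mem t lv y hy) hyl
        have hne : t.foldl min lv ≠ x := ne_of_lt (lt_of_lt_of_le hlt hlvx)
        rw [List.idxOf_cons_ne t (Ne.symm hne)]
        simp only [Prod.mk.injEq, Nat.succ_eq_add_one]
        exact ⟨trivial, by push_cast; ring⟩
      · rw [if_neg ht, if_neg]
        rintro ⟨y, hy, hylv⟩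
        rcases List.mem_cons.1 hy with h | h
        · exact hx (h ▸ hylv)
        · exact ht ⟨y, h, hylv⟩

lemma pkhStepA_some (x : Int) (t : List Int) (i : Int) :
    pkhStepA (some (x :: t)) i = some (pkhDrop1 (x :: t)) := by
  have hmax : PySem.List.max? (x :: t) (fun y => y) = some (t.foldl max x) :=
    PySem.List.max?_id_cons x t
  have hxM : x ≤ t.foldl max x := (PySem.List.le_foldl_max t x).1
  have hM : ∀ y ∈ x :: t, y ≤ t.foldl max x := by
    intro y hy
    rcases List.mem_cons.1 hy with h | h
    · exact h ▸ hxM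
    · exact (PySem.List.le_foldl_max t x).2 y h
  -- the scan finds the minimum value and its first index
  have hfold : (x :: t).foldl min (t.foldl max x) = t.foldl min x := by
    simp only [List.foldl_cons]; rw [min_eq_right hxM]
  set m := t.foldl min x with hm
  have hmem : m ∈ x :: t := by
    rcases foldl_min_mem_or t x with h | h
    · rw [hm, h]; exact List.mem_cons_self
    · exact List.mem_cons_of_mem _ (hm ▸ h)
  have hscan : ((PySem.List.enumerate (x :: t) 0).foldl
      (fun (acc : Int × Int) (qq : Int × Int) => if qq.2 < acc.1 then (qq.2, qq.1) else acc)
      (t.foldl max x, 0)) = (m, ((x :: t).idxOf m : Int)) := by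
    rw [pkh_scan_spec]
    by_cases h : ∃ y ∈ x :: t, y < t.foldl max x
    · rw [if_pos h, hfold]; simp
    · rw [if_neg h]
      have hall : ∀ y ∈ x :: t, t.foldl max x ≤ y := fun y hy => le_of_not_gt (fun hc => h ⟨y, hy, hc⟩)
      have hxeq : x = t.foldl max x := le_antisymm hxM (hall x List.mem_cons_self)
      have hmeq : m = t.foldl max x := by
        rw [← hfold]
        exact foldl_min_eq_init _ _ hall
      rw [hmeq, ← hxeq]
      simp [List.idxOf_cons_self]
  have hidx : (x :: t).idxOf m < (x :: t).length := List.idxOf_lt_length_of_mem hmem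
  have hpop : PySem.List.pop? (x :: t) (((x :: t).idxOf m : Nat) : Int)
      = some ((x :: t)[(x :: t).idxOf m], (x :: t).eraseIdx ((x :: t).idxOf m)) :=
    PySem.List.pop?_natCast _ _ hidx
  simp only [pkhStepA, hmax, hscan, hpop]
  rw [pkhDrop1, ← hm, List.eraseIdx_idxOf_eq_erase]

lemma pkhDrop1_length (p : List Int) (h : p ≠ []) : (pkhDrop1 p).length = p.length - 1 := by
  match p with
  | x :: t =>
    have hmem : t.foldl min x ∈ x :: t := by
      rcases foldl_min_mem_or t x with h' | h'
      · rw [h']; exact List.mem_cons_self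
      · exact List.mem_cons_of_mem _ h'
    rw [pkhDrop1, List.length_erase_of_mem hmem]

lemma pkhA_loop (idx : List Int) (p : List Int) (h : idx.length ≤ p.length) :
    idx.foldl pkhStepA (some p) = some (pkhDropMins idx.length p) := by
  induction idx generalizing p with
  | nil => rfl
  | cons i rest ih =>
    match p, h with
    | x :: t, h =>
      simp only [List.foldl_cons, pkhStepA_some]
      rw [ih (pkhDrop1 (x :: t)) (by
        rw [pkhDrop1_length _ (by simp)]
        simpa using Nat.le_sub_one_of_lt (Nat.lt_of_lt_of_le (Nat.lt_succ_self _) h))]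
      rfl

-- B-side: recursive form of the counting pass
def pkhPass (t : Int) : List Int → Int → List Int
  | [], _ => []
  | x :: xs, c =>
    if x < t then pkhPass t xs c
    else if x = t ∧ 0 < c then pkhPass t xs (c - 1)
    else x :: pkhPass t xs c

lemma pkh_foldl_pass (t : Int) (p : List Int) (acc : List Int) (c : Int) :
    (p.foldl (fun (a : List Int × Int) n =>
        if n < t then a
        else if n = t ∧ 0 < a.2 then (a.1, a.2 - 1)
        else (a.1 ++ [n], a.2)) (acc, c)).1 = acc ++ pkhPass t p c := by
  induction p generalizing acc c with
  | nil => simp [pkhPass]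
  | cons x xs ih =>
    simp only [List.foldl_cons, pkhPass]
    by_cases h1 : x < t
    · simp [h1, ih]
    · by_cases h2 : x = t ∧ 0 < c
      · simp [h1, h2, ih]
      · simp [h1, h2, ih]

lemma pkhPass_no_below (t : Int) (p : List Int) (c : Int) (hc : c ≤ 0)
    (h : ∀ x ∈ p, t ≤ x) : pkhPass t p c = p := by
  induction p with
  | nil => rfl
  | cons x xs ih =>
    rw [pkhPass, if_neg (not_lt.2 (h x List.mem_cons_self)),
      if_neg (by rintro ⟨-, hcpos⟩; omega)]
    rw [ih (fun y hy => h y (List.mem_cons_of_mem _ hy))]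

lemma pkhPass_erase_below (t : Int) (p : List Int) (c : Int) (m : Int)
    (hm : m ∈ p) (hlt : m < t) : pkhPass t (p.erase m) c = pkhPass t p c := by
  induction p generalizing c with
  | nil => cases hm
  | cons x xs ih =>
    by_cases hx : x = m
    · subst hx
      rw [List.erase_cons_head, pkhPass, if_pos hlt]
    · rw [List.erase_cons_tail (by simp [hx])]
      have hm' : m ∈ xs := by rcases List.mem_cons.1 hm with h | h; exact absurd h.symm hx; exact h
      rw [pkhPass, pkhPass]
      by_cases h1 : x < t
      · simp only [if_pos h1]; exact ih c hm'
      · by_cases h2 : x = t ∧ 0 < c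
        · simp only [if_neg h1, if_pos h2]; exact ih (c - 1) hm'
        · simp only [if_neg h1, if_neg h2]; rw [ih c hm']

lemma pkhPass_erase_eq (t : Int) (p : List Int) (c : Int)
    (hm : t ∈ p) (hall : ∀ x ∈ p, t ≤ x) (hc : 1 ≤ c) :
    pkhPass t (p.erase t) (c - 1) = pkhPass t p c := by
  induction p generalizing c with
  | nil => cases hm
  | cons x xs ih =>
    by_cases hx : x = t
    · subst hx
      rw [List.erase_cons_head, pkhPass, if_neg (lt_irrefl x), if_pos ⟨rfl, by omega⟩]
    · rw [List.erase_cons_tail (by simp [hx])]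
      have hm' : t ∈ xs := by rcases List.mem_cons.1 hm with h | h; exact absurd h.symm hx; exact h
      have hxt : t < x := lt_of_le_of_ne (hall x List.mem_cons_self) (fun h => hx h.symm)
      rw [pkhPass, pkhPass, if_neg (not_lt.2 (le_of_lt hxt)), if_neg (not_lt.2 (le_of_lt hxt)),
        if_neg (by rintro ⟨h, -⟩; exact hx h), if_neg (by rintro ⟨h, -⟩; exact hx h)]
      rw [ih c hm' (fun y hy => hall y (List.mem_cons_of_mem _ hy)) hc]

-- abstract form of B's else-branch
def pkhBcore (p : List Int) (r : Int) : List Int :=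
  if r ≤ 0 then p
  else
    match PySem.List.pyGet? (PySem.List.sorted p (fun y => y) false) (r - 1) with
    | none => []
    | some t => pkhPass t p (r - ((p.map (fun n => if n < t then (1 : Int) else 0)).sum))

lemma pkh_alt_eq_Bcore (pool : List Int) (keep : Int) :
    pool_keep_high_alt pool keep = pkhBcore pool (PySem.List.len pool - keep) := by
  unfold pool_keep_high_alt pkhBcore
  dsimp only
  split
  · rfl
  · split
    · rfl
    · rw [pkh_foldl_pass]; simp

lemma pkhDrop1_eq_erase (p : List Int) (m : Int) (hm : m ∈ p) (hmin : ∀ y ∈ p, m ≤ y) :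
    pkhDrop1 p = p.erase m := by
  cases p with
  | nil => cases hm
  | cons x tl =>
    have h1 : tl.foldl min x ≤ m := by
      rcases List.mem_cons.1 hm with h | h
      · exact h ▸ foldl_min_le_init tl x
      · exact foldl_min_le_mem tl x m h
    have h2 : m ≤ tl.foldl min x := by
      rcases foldl_min_mem_or tl x with h | h
      · rw [h]; exact hmin x List.mem_cons_self
      · exact hmin _ (List.mem_cons_of_mem _ h)
    rw [pkhDrop1, le_antisymm h1 h2]

lemma pkh_sum_erase (f : Int → Int) (p : List Int) (m : Int) (hm : m ∈ p) :
    (p.map f).sum = f m + ((p.erase m).map f).sum := by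
  have hp := (List.perm_cons_erase hm).map f
  rw [hp.sum_eq]
  simp

lemma pkh_sum_zero (f : Int → Int) (p : List Int) (h : ∀ x ∈ p, f x = 0) : (p.map f).sum = 0 :=
  List.sum_eq_zero (by
    intro x hx
    obtain ⟨n, hn, rfl⟩ := List.mem_map.1 hx
    exact h n hn)

lemma pkh_Bcore_step (p : List Int) (r : Int) (h1 : 1 ≤ r) (h2 : r ≤ (p.length : Int)) :
    pkhBcore p r = pkhBcore (pkhDrop1 p) (r - 1) := by
  cases hs : PySem.List.sorted p (fun y => y) false with
  | nil =>
    exfalso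
    have hl := PySem.List.length_sorted p (fun y => y) false
    rw [hs] at hl
    simp at hl
    omega
  | cons m' t' =>
    have hl := PySem.List.length_sorted p (fun y => y) false
    rw [hs] at hl
    have hlen : p.length = t'.length + 1 := by simpa using hl.symm
    have hmmem : m' ∈ p := (PySem.List.mem_sorted p (fun y => y) false m').1 (by rw [hs]; exact List.mem_cons_self)
    have hmin : ∀ y ∈ p, m' ≤ y := PySem.List.key_head_sorted_le p (fun y => y) hs
    have hdrop : pkhDrop1 p = p.erase m' := pkhDrop1_eq_erase p m' hmmem hmin
    have hperase : (p.erase m').Perm t' := by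
      have hp : p.Perm (m' :: t') := by rw [← hs]; exact (PySem.List.sorted_perm p (fun y => y) false).symm
      have h := hp.erase m'
      rwa [List.erase_cons_head] at h
    have hpw : List.Pairwise (fun a b => a ≤ b) (m' :: t') := by
      rw [← hs]; exact PySem.List.sorted_pairwise p (fun y => y)
    have hfor : ∀ y ∈ t', m' ≤ y := (List.pairwise_cons.1 hpw).1
    have hsorted' : PySem.List.sorted (p.erase m') (fun y => y) false = t' :=
      PySem.List.sorted_id_eq_of_perm_of_pairwise _ t' hperase.symm (List.pairwise_cons.1 hpw).2
    unfold pkhBcore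
    rw [hdrop, hs, hsorted']
    by_cases hr1 : r = 1
    · -- last removal: the threshold is the minimum itself
      subst hr1
      rw [if_neg (by norm_num : ¬ (1 : Int) ≤ 0), if_pos (by norm_num : (1 : Int) - 1 ≤ 0)]
      rw [show (1 : Int) - 1 = ((0 : Nat) : Int) by norm_num, PySem.List.pyGet?_natCast,
        List.getElem?_eq_getElem (by simp : 0 < (m' :: t').length)]
      simp only [List.getElem_cons_zero]
      show pkhPass m' p (1 - (p.map (fun n => if n < m' then (1 : Int) else 0)).sum) = p.erase m'
      have hsum0 : (p.map (fun n => if n < m' then (1 : Int) else 0)).sum = 0 :=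
        pkh_sum_zero _ p (fun x hx => by rw [if_neg (not_lt.2 (hmin x hx))])
      rw [hsum0, show (1 : Int) - 0 = 1 by norm_num,
        ← pkhPass_erase_eq m' p 1 hmmem hmin (le_refl 1)]
      exact pkhPass_no_below m' (p.erase m') (1 - 1) (by norm_num)
        (fun x hx => hmin x (List.mem_of_mem_erase hx))
    · -- r ≥ 2: the threshold is unchanged
      have hr2 : 2 ≤ r := by omega
      set k := (r - 1).toNat with hk
      have hkr : r - 1 = ((k : Nat) : Int) := by omega
      have hkp : k < p.length := by omega
      have hk1 : 1 ≤ k := by omega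
      rw [if_neg (by omega : ¬ r ≤ 0), if_neg (by omega : ¬ r - 1 ≤ 0)]
      rw [show r - 1 - 1 = (((k - 1 : Nat) : Nat) : Int) by omega]
      rw [hkr, PySem.List.pyGet?_natCast, PySem.List.pyGet?_natCast,
        List.getElem?_eq_getElem (by omega : k < (m' :: t').length),
        List.getElem?_eq_getElem (by omega : k - 1 < t'.length)]
      obtain ⟨j, hj⟩ : ∃ j, k = j + 1 := ⟨k - 1, by omega⟩
      have hget : (m' :: t')[k]'(by omega) = t'[k - 1]'(by omega) := by
        simp only [hj, List.getElem_cons_succ, Nat.add_sub_cancel]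
      rw [hget]
      dsimp only
      have htmem : t'[k - 1]'(by omega) ∈ t' := List.getElem_mem _
      have hm't : m' ≤ t'[k - 1]'(by omega) := hfor _ htmem
      set T := t'[k - 1]'(by omega) with hT
      show pkhPass T p (r - (p.map (fun n => if n < T then (1 : Int) else 0)).sum)
        = pkhPass T (p.erase m') (((k : Nat) : Int) - ((p.erase m').map (fun n => if n < T then (1 : Int) else 0)).sum)
      have hsum := pkh_sum_erase (fun n => if n < T then (1 : Int) else 0) p m' hmmem
      by_cases hmt : m' < T
      · have hB : r - (p.map (fun n => if n < T then (1 : Int) else 0)).sum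
            = ((k : Nat) : Int) - ((p.erase m').map (fun n => if n < T then (1 : Int) else 0)).sum := by
          rw [hsum, show ((fun n => if n < T then (1 : Int) else 0) m') = 1 from by simp [hmt]]
          omega
        rw [hB]
        exact (pkhPass_erase_below T p _ m' hmmem hmt).symm
      · have hteq : m' = T := le_antisymm hm't (not_lt.1 hmt)
        have hz : (p.map (fun n => if n < T then (1 : Int) else 0)).sum = 0 :=
          pkh_sum_zero _ p (fun y hy => by rw [if_neg (not_lt.2 (hteq ▸ hmin y hy))])
        have hz' : ((p.erase m').map (fun n => if n < T then (1 : Int) else 0)).sum = 0 :=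
          pkh_sum_zero _ _ (fun y hy => by rw [if_neg (not_lt.2 (hteq ▸ hmin y (List.mem_of_mem_erase hy)))])
        rw [hz, hz', sub_zero, sub_zero, ← hkr, hteq]
        exact (pkhPass_erase_eq T p r (hteq ▸ hmmem) (fun y hy => hteq ▸ hmin y hy) (by omega)).symm

lemma pkh_Bcore_eq_dropMins (k : Nat) (p : List Int) (h : k ≤ p.length) :
    pkhBcore p (k : Int) = pkhDropMins k p := by
  induction k generalizing p with
  | zero => simp [pkhBcore, pkhDropMins]
  | succ k ih =>
    have hne : p ≠ [] := by rintro rfl; simp at h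
    have hstep := pkh_Bcore_step p ((k + 1 : Nat) : Int) (by omega) (by omega)
    rw [hstep]
    have : ((k + 1 : Nat) : Int) - 1 = (k : Int) := by push_cast; ring
    rw [this, ih (pkhDrop1 p) (by rw [pkhDrop1_length p hne]; omega)]
    rfl

-- ===== VERDICT (by name: the statement is the Claim_ definition above) =====
theorem pool_keep_high_spec : Claim_equal_pool_keep_high := by
  intro pool keep _hdom hpre
  unfold Spec_pool_keep_high
  unfold Pre_pool_keep_high at hpre
  rw [pkh_alt_eq_Bcore]
  unfold pool_keep_high
  simp only [PySem.List.len_eq]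
  set remove := (pool.length : Int) - keep with hrem
  by_cases h : remove ≤ 0
  · rw [PySem.List.pyRange_one_eq_nil h]
    simp [pkhBcore, h]
  · push_neg at h
    have hlen : (PySem.List.pyRange 0 remove 1).length = remove.toNat := by
      rw [PySem.List.length_pyRange_one]; simp
    have hle : remove.toNat ≤ pool.length := by omega
    rw [pkhA_loop _ pool (by rw [hlen]; exact hle)]
    rw [hlen]
    have h2 := pkh_Bcore_eq_dropMins remove.toNat pool hle
    rw [show ((remove.toNat : Nat) : Int) = remove by omega] at h2
    simpa using h2.symm
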